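-- pv_equiv track=rewrite | github.com/avishekchy45/Bio-informatics-LAB-TASKS | partial_digest_algorithm.py | remove_distances
-- ===== SOURCE A (Python) =====
-- from collections import Counter
--
-- def remove_distances(D, distances):
--     D_count = Counter(D)  # Multiset behavior using Counter
--     for d in distances:
--         if D_count[d] > 0:
--             D_count[d] -= 1
--         else:
--             return None  # If we can't remove the required distance, return None
--     return list(D_count.elements())  # Return the remaining multiset as a list
-- ===== SOURCE B (Python) =====
-- def remove_distances(D, distances):
--     out = []
--     seen = set()
--     for v in D:
--         if v not in seen:
--             seen.add(v)
--             rem = D.count(v) - distances.count(v)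
--             if rem < 0:
--                 return None
--             out += [v] * rem
--     for d in distances:
--         if d not in seen:
--             return None
--     return out
-- ===== Notes on version B (the rewrite author's own statement) =====
-- stated objective: alternative
-- what changed: Drops the Counter entirely: B walks D once, and at each value's first occurrence computes the surviving multiplicity by two list.count scans (D.count(v) - distances.count(v)), emitting the survivors directly in first-appearance order; a final membership pass rejects distances values absent from D.
import Mathlib
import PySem

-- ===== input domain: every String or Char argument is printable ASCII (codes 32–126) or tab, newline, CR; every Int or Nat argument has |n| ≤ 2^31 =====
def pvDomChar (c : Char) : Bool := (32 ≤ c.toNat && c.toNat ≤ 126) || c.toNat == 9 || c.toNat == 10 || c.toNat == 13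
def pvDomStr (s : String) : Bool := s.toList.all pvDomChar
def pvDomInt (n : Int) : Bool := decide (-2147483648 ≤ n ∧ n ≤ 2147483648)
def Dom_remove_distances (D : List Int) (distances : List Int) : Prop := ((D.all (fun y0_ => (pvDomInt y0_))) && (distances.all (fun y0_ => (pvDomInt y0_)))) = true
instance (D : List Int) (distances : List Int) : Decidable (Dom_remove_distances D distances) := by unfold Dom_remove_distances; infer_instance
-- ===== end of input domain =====

-- B drops the Counter: one walk of D, emitting each value's surviving copies (D.count - distances.count) at its first occurrence, then a membership pass over distances (objective: alternative).
-- ===== PORT A =====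
def pvElements (d : PySem.Dict Int Int) : List Int :=
  d.items.flatMap (fun p => List.replicate p.2.toNat p.1)

-- the early-exit decrement loop of A ('for d in distances: ...')
def pvLoopA : List Int → PySem.Dict Int Int → Option (PySem.Dict Int Int)
  | [], dc => some dc
  | d :: rest, dc =>
      if dc.getD d 0 > 0 then pvLoopA rest (dc.modify d 0 (fun v => v - 1)) else none

def remove_distances (D : List Int) (distances : List Int) : Option (List Int) :=
  (pvLoopA distances (PySem.Dict.counter D)).map pvElements

-- ===== PORT B =====
-- 'for v in D: if v not in seen: seen.add(v); rem = D.count(v) - distances.count(v); ...'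
def pvLoopB (Dfull distances : List Int) : List Int → PySem.Set Int → List Int → Option (List Int × PySem.Set Int)
  | [], seen, out => some (out, seen)
  | v :: rest, seen, out =>
      if PySem.Set.contains seen v then pvLoopB Dfull distances rest seen out
      else
        let rem : Int := (Dfull.count v : Int) - (distances.count v : Int)
        if rem < 0 then none
        else pvLoopB Dfull distances rest (PySem.Set.add seen v) (out ++ List.replicate rem.toNat v)

def remove_distances_alt (D : List Int) (distances : List Int) : Option (List Int) :=
  match pvLoopB D distances D PySem.Set.empty [] with
  | none => none
  | some (out, seen) =>
      -- 'for d in distances: if d not in seen: return None' then 'return out'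
      if distances.all (fun d => PySem.Set.contains seen d) then some out else none

-- ===== PRECONDITION & SPEC =====
def Spec_remove_distances (D : List Int) (distances : List Int) (out : Option (List Int)) : Prop := out = remove_distances_alt D distances
instance (D : List Int) (distances : List Int) (out : Option (List Int)) : Decidable (Spec_remove_distances D distances out) := by unfold Spec_remove_distances; infer_instance

-- ===== CLAIM (what is proved, stated in full; the proofs are below) =====
def Claim_equal_remove_distances : Prop := ∀ (D : List Int) (distances : List Int), Dom_remove_distances D distances → Spec_remove_distances D distances (remove_distances D distances)

-- ===== LEMMAS AND PROOFS =====

-- Set.contains is membership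
theorem pv_contains_mem (s : PySem.Set Int) (x : Int) : (PySem.Set.contains s x = true) ↔ x ∈ s := by
  simp [PySem.Set.contains]

-- find? locates a member pair when keys are unique
theorem pv_find_of_mem (k v : Int) : ∀ (items : List (Int × Int)),
    (items.map Prod.fst).Nodup → (k, v) ∈ items →
    items.find? (fun p => p.1 == k) = some (k, v) := by
  intro items
  induction items with
  | nil => intro _ hm; simp at hm
  | cons p rest ih =>
      intro hnd hm
      rcases List.mem_cons.mp hm with hm | hm
      · subst hm; simp
      · have hne : p.1 ≠ k := by
          intro hkk
          have hk : k ∈ rest.map Prod.fst := List.mem_map.mpr ⟨(k, v), hm, rfl⟩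
          rw [List.map_cons, List.nodup_cons, hkk] at hnd
          exact hnd.1 hk
        rw [List.find?_cons_of_neg (by simp [hne])]
        exact ih (List.nodup_cons.mp (by simpa using hnd)).2 hm

-- value of a key read off its item, when keys are unique
theorem pv_getD_of_mem {dc : PySem.Dict Int Int} (hnd : dc.keys.Nodup)
    {k : Int} {v : Int} (hm : (k, v) ∈ dc.items) (dflt : Int) :
    dc.getD k dflt = v := by
  simp only [PySem.Dict.getD, PySem.Dict.get?]
  rw [pv_find_of_mem k v dc.items hnd hm]
  rfl

-- items of an in-place decrement (modify of a PRESENT key) with unique keys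
theorem pv_items_modify_mem {dc : PySem.Dict Int Int} (hnd : dc.keys.Nodup)
    {k : Int} (hk : dc.contains k = true) (d0 : Int) (f : Int → Int) :
    (dc.modify k d0 f).items = dc.items.map (fun p => if p.1 = k then (p.1, f p.2) else p) := by
  simp only [PySem.Dict.modify, PySem.Dict.insert, hk, if_pos]
  apply List.map_congr_left
  intro p hp
  by_cases hpk : p.1 = k
  · have hv : dc.getD k d0 = p.2 := by
      have : (k, p.2) ∈ dc.items := by rw [← hpk]; exact hp
      exact pv_getD_of_mem hnd this d0
    simp [hpk, hv]
  · simp [hpk]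

theorem pv_keys_modify_mem {dc : PySem.Dict Int Int} (hnd : dc.keys.Nodup)
    {k : Int} (hk : dc.contains k = true) (d0 : Int) (f : Int → Int) :
    (dc.modify k d0 f).keys = dc.keys := by
  simp only [PySem.Dict.keys, pv_items_modify_mem hnd hk d0 f, List.map_map]
  apply List.map_congr_left
  intro p _
  by_cases hpk : p.1 = k <;> simp [hpk]

theorem pv_contains_of_getD_pos {dc : PySem.Dict Int Int} {k : Int}
    (h : dc.getD k 0 > 0) : dc.contains k = true := by
  simp only [PySem.Dict.getD, PySem.Dict.get?] at h
  cases hf : dc.items.find? (fun p => p.1 == k) with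
  | none => rw [hf] at h; simp at h
  | some p =>
      have hmem : p ∈ dc.items := List.mem_of_find?_eq_some hf
      have hpk : (p.1 == k) = true := (List.find?_eq_some_iff_append.mp hf).1
      simp only [PySem.Dict.contains, List.any_eq_true]
      exact ⟨p, hmem, hpk⟩

-- characterisation of A's early-exit loop
theorem pv_loopA_spec (ds : List Int) (dc : PySem.Dict Int Int) (hnd : dc.keys.Nodup) :
    pvLoopA ds dc =
      if (∀ k ∈ ds, ((ds.count k : Int) ≤ dc.getD k 0)) then
        some ⟨dc.items.map (fun p => (p.1, p.2 - (ds.count p.1 : Int)))⟩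
      else none := by
  induction ds generalizing dc with
  | nil =>
      obtain ⟨items⟩ := dc
      simp [pvLoopA]
  | cons d rest ih =>
      by_cases h : dc.getD d 0 > 0
      · have hcont : dc.contains d = true := pv_contains_of_getD_pos h
        have hitems := pv_items_modify_mem hnd hcont 0 (fun v => v - 1)
        have hnd' : (dc.modify d 0 (fun v => v - 1)).keys.Nodup := by
          rw [pv_keys_modify_mem hnd hcont]; exact hnd
        have hgd : ∀ k, (dc.modify d 0 (fun v => v - 1)).getD k 0 =
            if k = d then dc.getD d 0 - 1 else dc.getD k 0 := by
          intro k; simpa using PySem.Dict.getD_modify dc d k 0 (fun v => v - 1)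
        have hiff : (∀ k ∈ rest, ((rest.count k : Int) ≤ (dc.modify d 0 (fun v => v - 1)).getD k 0))
            ↔ (∀ k ∈ (d :: rest), (((d :: rest).count k : Int) ≤ dc.getD k 0)) := by
          constructor
          · intro hh k hk
            by_cases hkd : k = d
            · subst hkd
              by_cases hkr : k ∈ rest
              · have := hh k hkr; rw [hgd k, if_pos rfl] at this
                simp [List.count_cons_self]; omega
              · have : rest.count k = 0 := List.count_eq_zero.mpr hkr
                simp [List.count_cons_self, this]; omega
            · have hkr : k ∈ rest := (List.mem_cons.mp hk).resolve_left hkd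
              have := hh k hkr; rw [hgd k, if_neg hkd] at this
              rw [List.count_cons_of_ne (by exact fun hq => hkd hq.symm)]
              exact this
          · intro hh k hk
            rw [hgd k]
            by_cases hkd : k = d
            · subst hkd
              have := hh k (List.mem_cons_self)
              rw [if_pos rfl]
              simp [List.count_cons_self] at this
              omega
            · rw [if_neg hkd]
              have := hh k (List.mem_cons_of_mem d hk)
              rw [List.count_cons_of_ne (by exact fun hq => hkd hq.symm)] at this
              exact this
        have hmaps : (dc.modify d 0 (fun v => v - 1)).items.map
              (fun p => (p.1, p.2 - (rest.count p.1 : Int)))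
            = dc.items.map (fun p => (p.1, p.2 - ((d :: rest).count p.1 : Int))) := by
          rw [hitems, List.map_map]
          apply List.map_congr_left
          intro p _
          by_cases hpd : p.1 = d
          · simp only [Function.comp, hpd]
            simp [List.count_cons_self]; ring
          · simp only [Function.comp, if_neg hpd]
            rw [List.count_cons_of_ne (by exact fun hq => hpd hq.symm)]
        rw [show pvLoopA (d :: rest) dc = pvLoopA rest (dc.modify d 0 (fun v => v - 1)) by
              simp [pvLoopA, h]]
        rw [ih _ hnd']
        by_cases hc : ∀ k ∈ (d :: rest), (((d :: rest).count k : Int) ≤ dc.getD k 0)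
        · rw [if_pos (hiff.mpr hc), if_pos hc, hmaps]
        · rw [if_neg (fun hh => hc (hiff.mp hh)), if_neg hc]
      · have hfail : ¬ (∀ k ∈ (d :: rest), (((d :: rest).count k : Int) ≤ dc.getD k 0)) := by
          intro hh
          have := hh d (List.mem_cons_self)
          simp [List.count_cons_self] at this
          omega
        rw [if_neg hfail]
        simp [pvLoopA, h]

-- the fresh keys B's loop processes, in order
def pvNewKeys (seen : PySem.Set Int) : List Int → List Int
  | [] => []
  | v :: rest =>
      if PySem.Set.contains seen v then pvNewKeys seen rest
      else v :: pvNewKeys (PySem.Set.add seen v) rest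

theorem pv_newKeys_append (seen : PySem.Set Int) (l : List Int) :
    (seen : List Int) ++ pvNewKeys seen l = l.foldl PySem.Set.add seen := by
  induction l generalizing seen with
  | nil => simp [pvNewKeys]
  | cons v rest ih =>
      by_cases hm : v ∈ seen
      · have h : PySem.Set.contains seen v = true := (pv_contains_mem seen v).mpr hm
        simp only [pvNewKeys, h, if_pos, List.foldl_cons, PySem.Set.add_of_mem hm, ih]
      · have h : PySem.Set.contains seen v = false := by
          rw [← Bool.not_eq_true]; exact fun hc => hm ((pv_contains_mem seen v).mp hc)
        simp only [pvNewKeys, h, List.foldl_cons, Bool.false_eq_true, if_false]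
        rw [← ih (PySem.Set.add seen v), PySem.Set.add_of_not_mem hm]
        simp

-- characterisation of B's first loop
theorem pv_loopB_spec (Dfull distances : List Int) (l : List Int) :
    ∀ (seen : PySem.Set Int) (out : List Int),
    pvLoopB Dfull distances l seen out =
      if (∀ v ∈ l, v ∉ seen → ((distances.count v : Int) ≤ Dfull.count v)) then
        some (out ++ (pvNewKeys seen l).flatMap
                (fun k => List.replicate ((Dfull.count k : Int) - distances.count k).toNat k),
              l.foldl PySem.Set.add seen)
      else none := by
  induction l with
  | nil => intro seen out; simp [pvLoopB, pvNewKeys]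
  | cons v rest ih =>
      intro seen out
      by_cases hm : v ∈ seen
      · have h : PySem.Set.contains seen v = true := (pv_contains_mem seen v).mpr hm
        have hiff : (∀ u ∈ rest, u ∉ seen → ((distances.count u : Int) ≤ Dfull.count u))
            ↔ (∀ u ∈ (v :: rest), u ∉ seen → ((distances.count u : Int) ≤ Dfull.count u)) := by
          constructor
          · intro hh u hu hs
            rcases List.mem_cons.mp hu with hu | hu
            · subst hu; exact absurd hm hs
            · exact hh u hu hs
          · intro hh u hu hs; exact hh u (List.mem_cons_of_mem v hu) hs
        simp only [pvLoopB, h, if_pos, ih seen out, pvNewKeys, List.foldl_cons,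
          PySem.Set.add_of_mem hm]
        by_cases hc : ∀ u ∈ (v :: rest), u ∉ seen → ((distances.count u : Int) ≤ Dfull.count u)
        · rw [if_pos (hiff.mpr hc), if_pos hc]
        · rw [if_neg (fun hh => hc (hiff.mp hh)), if_neg hc]
      · have h : PySem.Set.contains seen v = false := by
          rw [← Bool.not_eq_true]; exact fun hc => hm ((pv_contains_mem seen v).mp hc)
        by_cases hv : (Dfull.count v : Int) - (distances.count v : Int) < 0
        · have hfail : ¬ (∀ u ∈ (v :: rest), u ∉ seen →
              ((distances.count u : Int) ≤ Dfull.count u)) := by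
            intro hh
            have := hh v (List.mem_cons_self) hm
            omega
          simp only [pvLoopB, h, Bool.false_eq_true, if_false]
          rw [if_pos hv, if_neg hfail]
        · have hiff : (∀ u ∈ rest, u ∉ PySem.Set.add seen v →
                ((distances.count u : Int) ≤ Dfull.count u))
              ↔ (∀ u ∈ (v :: rest), u ∉ seen →
                ((distances.count u : Int) ≤ Dfull.count u)) := by
            constructor
            · intro hh u hu hs
              rcases List.mem_cons.mp hu with hu | hu
              · subst hu; omega
              · by_cases huv : u = v
                · subst huv; omega
                · exact hh u hu (fun hc => by
                    rcases (PySem.Set.mem_add seen v u).mp hc with hc | hc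
                    · exact hs hc
                    · exact huv hc)
            · intro hh u hu hs
              have : u ∉ seen := fun hc => hs ((PySem.Set.mem_add seen v u).mpr (Or.inl hc))
              exact hh u (List.mem_cons_of_mem v hu) this
          simp only [pvLoopB, h, Bool.false_eq_true, if_false]
          rw [if_neg hv, ih (PySem.Set.add seen v) (out ++ _)]
          simp only [pvNewKeys, h, Bool.false_eq_true, if_false, List.foldl_cons]
          by_cases hc : ∀ u ∈ (v :: rest), u ∉ seen → ((distances.count u : Int) ≤ Dfull.count u)
          · rw [if_pos (hiff.mpr hc), if_pos hc]
            simp [List.flatMap_cons, List.append_assoc]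
          · rw [if_neg (fun hh => hc (hiff.mp hh)), if_neg hc]

-- membership in set(xs) built by the fold
theorem pv_contains_foldl (l : List Int) (k : Int) :
    (PySem.Set.contains (l.foldl PySem.Set.add PySem.Set.empty) k = true) ↔ k ∈ l := by
  have h : l.foldl PySem.Set.add PySem.Set.empty = PySem.Set.ofList l := by
    rw [PySem.Set.ofList_eq_foldl]; rfl
  rw [h, pv_contains_mem]
  exact PySem.Set.mem_ofList l k

-- ===== VERDICT (by name: the statement is the Claim_ definition above) =====
theorem remove_distances_spec : Claim_equal_remove_distances := by
  intro D distances _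
  unfold Spec_remove_distances
  simp only [remove_distances, remove_distances_alt]
  rw [pv_loopA_spec distances (PySem.Dict.counter D) (PySem.Dict.nodup_keys_counter D),
      pv_loopB_spec D distances D]
  by_cases hA : ∀ k ∈ distances, ((distances.count k : Int) ≤ (PySem.Dict.counter D).getD k 0)
  · -- A succeeds: show B's loop condition and the membership check both pass, and values agree
    have hA' : ∀ k ∈ distances, ((distances.count k : Int) ≤ D.count k) := by
      intro k hk; have := hA k hk; rwa [PySem.Dict.getD_counter] at this
    have hB1 : ∀ v ∈ D, v ∉ (PySem.Set.empty : PySem.Set Int) →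
        ((distances.count v : Int) ≤ D.count v) := by
      intro v hv _
      by_cases hvd : v ∈ distances
      · exact hA' v hvd
      · have : distances.count v = 0 := List.count_eq_zero.mpr hvd
        rw [this]
        exact_mod_cast Nat.zero_le _
    have hB2 : (distances.all
        (fun d => PySem.Set.contains (D.foldl PySem.Set.add PySem.Set.empty) d)) = true := by
      rw [List.all_eq_true]
      intro d hd
      rw [pv_contains_foldl]
      have := hA' d hd
      have hpos : 1 ≤ distances.count d := List.one_le_count_iff.mpr hd
      have : 1 ≤ D.count d := by omega
      exact List.one_le_count_iff.mp this
    rw [if_pos hA, if_pos hB1]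
    simp only [Option.map_some]
    rw [if_pos hB2]
    congr 1
    -- A's value vs B's value
    unfold pvElements
    simp only [PySem.Dict.items_counter, List.map_map, List.nil_append]
    have hkeys : pvNewKeys PySem.Set.empty D = PySem.Set.ofList D := by
      have := pv_newKeys_append PySem.Set.empty D
      rw [PySem.Set.ofList_eq_foldl]
      simpa [PySem.Set.empty] using this
    rw [hkeys]
    simp [PySem.Dict.items_counter, List.flatMap_map, List.map_map, Function.comp]
  · -- A fails: B must return none too
    rw [if_neg hA]
    have hA' : ¬ ∀ k ∈ distances, ((distances.count k : Int) ≤ D.count k) := by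
      intro hh; exact hA (fun k hk => by rw [PySem.Dict.getD_counter]; exact hh k hk)
    push_neg at hA'
    obtain ⟨k, hk, hgt⟩ := hA'
    by_cases hc : ∀ v ∈ D, v ∉ (PySem.Set.empty : PySem.Set Int) →
        ((distances.count v : Int) ≤ D.count v)
    · -- B's first loop succeeds, so k ∉ D and the membership pass rejects k
      have hkD : k ∉ D := fun hkD =>
        absurd (hc k hkD (by simp [PySem.Set.empty])) (by omega)
      rw [if_pos hc]
      simp
      exact ⟨k, hk, fun hm => hkD ((pv_contains_foldl D k).mp ((pv_contains_mem _ k).mpr hm))⟩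
    · -- B's first loop already fails
      rw [if_neg hc]
      rfl
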